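-- pv_equiv track=rewrite | github.com/3xp10it/sqlmap_my_tamper | mytemper.py | charunicodeencode
-- ===== SOURCE A (Python) =====
-- def charunicodeencode(payload, **kwargs):
--     """
--     Unicode-url-encodes non-encoded characters in a given payload (not
--     processing already encoded)
--     Requirement:
--         * ASP
--         * ASP.NET
--     Tested against:
--         * Microsoft SQL Server 2000
--         * Microsoft SQL Server 2005
--         * MySQL 5.1.56
--         * PostgreSQL 9.0.3
--     Notes:
--         * Useful to bypass weak web application firewalls that do not
--           unicode url-decode the request before processing it through their
--           ruleset
--     >>> tamper('SELECT FIELD%20FROM TABLE')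
--     '%u0053%u0045%u004C%u0045%u0043%u0054%u0020%u0046%u0049%u0045%u004C%u0044%u0020%u0046%u0052%u004F%u004D%u0020%u0054%u0041%u0042%u004C%u0045'
--     """
--     retVal = payload
--
--     if payload:
--         retVal = ""
--         i = 0
--         while i < len(payload):
--             if payload[i] == '%' and (i < len(payload) - 2) and payload[i + 1:i + 2] in string.hexdigits and payload[i + 2:i + 3] in string.hexdigits:
--                 retVal += "%%u00%s" % payload[i + 1:i + 3]
--                 i += 3
--             else:
--                 retVal += '%%u%.4X' % ord(payload[i])
--                 i += 1
--     return retVal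
-- ===== SOURCE B (Python) =====
-- import re
--
-- _UNI = re.compile(r'%[0-9a-fA-F]{2}|.', re.DOTALL)
--
--
-- def _uni_repl(m):
--     s = m.group(0)
--     if len(s) == 3:                      # an existing %XX escape: keep its digits verbatim
--         return "%u00" + s[1:]
--     return "%%u%.4X" % ord(s)            # any other single character
--
--
-- def charunicodeencode(payload, **kwargs):
--     if not payload:
--         return payload
--     return _UNI.sub(_uni_repl, payload)
-- ===== Notes on version B (the rewrite author's own statement) =====
-- stated objective: idiomatic
-- what changed: Replaced A's index-arithmetic while loop with manual slicing/bounds checks by a single compiled-regex substitution ('%[0-9a-fA-F]{2}|.' with DOTALL) whose replacement function keeps existing hex escapes verbatim and unicode-encodes every other character.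
-- crash fix: The module as given never imports the string module, so A raises NameError on every payload containing a percent sign before its last two characters (the first time the escape test is evaluated); B returns the documented unicode-url-encoding there, preserving existing hex escapes. — e.g. on charunicodeencode("%41"): A raises NameError, B returns "%u0041"
import Mathlib
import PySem

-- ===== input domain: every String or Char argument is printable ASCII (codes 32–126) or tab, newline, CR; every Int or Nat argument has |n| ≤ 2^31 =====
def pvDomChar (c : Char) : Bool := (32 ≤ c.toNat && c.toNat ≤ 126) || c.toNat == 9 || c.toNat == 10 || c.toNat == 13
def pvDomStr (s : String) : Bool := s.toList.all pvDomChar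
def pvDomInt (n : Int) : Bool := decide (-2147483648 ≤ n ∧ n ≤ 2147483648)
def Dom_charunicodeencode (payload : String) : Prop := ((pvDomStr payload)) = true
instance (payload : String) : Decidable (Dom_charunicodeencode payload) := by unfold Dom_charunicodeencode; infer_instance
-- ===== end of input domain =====

-- B replaces A's index-arithmetic while loop with a single regex substitution
-- (pattern '%[0-9a-fA-F]{2}|.', DOTALL), ported as a leftmost-match structural
-- scanner; objective: idiomatic.

-- shared formatting helpers ('%.4X' % ord(c) and the string.hexdigits test)
def pvHexUpper : List Char := "0123456789ABCDEF".toList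

def pvHexDigitChar (n : Nat) : Char := pvHexUpper.getD n '0'

-- '%.4X' % n  (as a char list; exact for n < 65536, which Dom guarantees)
def pvHex4 (n : Nat) : List Char :=
  [pvHexDigitChar (n / 4096 % 16), pvHexDigitChar (n / 256 % 16),
   pvHexDigitChar (n / 16 % 16), pvHexDigitChar (n % 16)]

-- one-char slice `in string.hexdigits`: for a single char this is membership
def pvIsHex (c : Char) : Bool := "0123456789abcdefABCDEF".toList.contains c

-- ===== PORT A =====
-- A's while loop: index i over the payload; the Python test `i < len(payload) - 2`
-- over ints equals `i + 2 < p.length` here since i ≥ 0.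
def pvALoop (p : List Char) (i : Nat) (acc : List Char) : List Char :=
  if i < p.length then
    if p.getD i ' ' == '%' && decide (i + 2 < p.length)
        && pvIsHex (p.getD (i+1) ' ') && pvIsHex (p.getD (i+2) ' ') then
      pvALoop p (i + 3) (acc ++ ['%', 'u', '0', '0', p.getD (i+1) ' ', p.getD (i+2) ' '])
    else
      pvALoop p (i + 1) (acc ++ '%' :: 'u' :: pvHex4 (p.getD i ' ').toNat)
  else acc
termination_by p.length - i

def charunicodeencode (payload : String) : String :=
  if payload == "" then payload
  else String.ofList (pvALoop payload.toList 0 [])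

-- ===== PORT B =====
-- the regex sub: a '%XX' match keeps its two hex digits after '%u00';
-- any other single char ('.' with DOTALL) becomes '%uXXXX'.
def pvBLoop : List Char → List Char
  | '%' :: h1 :: h2 :: rest =>
      if pvIsHex h1 && pvIsHex h2 then
        '%' :: 'u' :: '0' :: '0' :: h1 :: h2 :: pvBLoop rest
      else
        '%' :: 'u' :: pvHex4 ('%'.toNat) ++ pvBLoop (h1 :: h2 :: rest)
  | c :: rest => '%' :: 'u' :: pvHex4 c.toNat ++ pvBLoop rest
  | [] => []

def charunicodeencode_alt (payload : String) : String :=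
  if payload == "" then payload
  else String.ofList (pvBLoop payload.toList)

-- ===== PRECONDITION & SPEC =====
-- Pre_ excludes exactly the inputs on which the given A RAISES: the module as
-- given never imports the string module, so evaluating string.hexdigits raises
-- NameError the first time a percent sign is seen at an index i with i < len(payload) - 2.
def Pre_charunicodeencode (payload : String) : Prop :=
  ((payload.toList.take (payload.toList.length - 2)).contains '%') = false
instance (payload : String) : Decidable (Pre_charunicodeencode payload) := by unfold Pre_charunicodeencode; infer_instance
def pvWitness_charunicodeencode : String := "SELECT 1"

-- The module as given never imports the string module, so A raises NameError on
-- every payload containing a percent sign before its last two characters; B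
-- returns the documented unicode-url-encoding there, preserving existing hex escapes.
def Raises_charunicodeencode (payload : String) : Prop :=
  ((payload.toList.take (payload.toList.length - 2)).contains '%') = true
instance (payload : String) : Decidable (Raises_charunicodeencode payload) := by unfold Raises_charunicodeencode; infer_instance
def pvRaiseWitness_charunicodeencode : String := "%41"
def pvRaiseWitnessOut_charunicodeencode : String := "%u0041"

def Spec_charunicodeencode (payload : String) (out : String) : Prop := out = charunicodeencode_alt payload
instance (payload : String) (out : String) : Decidable (Spec_charunicodeencode payload out) := by unfold Spec_charunicodeencode; infer_instance

-- ===== CLAIM (what is proved, stated in full; the proofs are below) =====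
def Claim_equal_charunicodeencode : Prop := ∀ (payload : String), Dom_charunicodeencode payload → Pre_charunicodeencode payload → Spec_charunicodeencode payload (charunicodeencode payload)

-- crash-fix claim, proved below as charunicodeencode_raises: the Raises_ region
-- lies outside Pre_, and at the witness B's port returns the stated literal.
def Claim_raises_charunicodeencode : Prop := (∀ (payload : String), Dom_charunicodeencode payload → Raises_charunicodeencode payload → ¬ Pre_charunicodeencode payload) ∧ (Dom_charunicodeencode (pvRaiseWitness_charunicodeencode) ∧ Raises_charunicodeencode (pvRaiseWitness_charunicodeencode) ∧ charunicodeencode_alt (pvRaiseWitness_charunicodeencode) = pvRaiseWitnessOut_charunicodeencode)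

-- ===== LEMMAS AND PROOFS =====

lemma pvBLoop_cons (c : Char) (t : List Char)
    (h : ¬(c = '%' ∧ ∃ h1 h2 r, t = h1 :: h2 :: r ∧ pvIsHex h1 = true ∧ pvIsHex h2 = true)) :
    pvBLoop (c :: t) = '%' :: 'u' :: pvHex4 c.toNat ++ pvBLoop t := by
  rcases t with _ | ⟨a, _ | ⟨b, r⟩⟩
  · rw [pvBLoop.eq_def]
    split
    · rename_i heq; simp at heq
    · rename_i x heq; injection heq with e1 e2; subst e1; subst e2; rfl
    · rename_i heq; exact absurd heq (by simp)
  · rw [pvBLoop.eq_def]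
    split
    · rename_i heq; simp at heq
    · rename_i x heq; injection heq with e1 e2; subst e1; subst e2; rfl
    · rename_i heq; exact absurd heq (by simp)
  · rw [pvBLoop.eq_def]
    split
    · rename_i heq
      simp only [List.cons.injEq] at heq
      obtain ⟨h0, h1, h2, h3⟩ := heq
      subst h0 h1 h2 h3
      have hx : ¬(pvIsHex a = true ∧ pvIsHex b = true) := fun ⟨x, y⟩ =>
        h ⟨rfl, a, b, r, rfl, x, y⟩
      rcases Bool.eq_false_or_eq_true (pvIsHex a) with ha | ha
      · have hb : pvIsHex b = false := by
          rcases Bool.eq_false_or_eq_true (pvIsHex b) with hb | hb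
          · exact absurd ⟨ha, hb⟩ hx
          · exact hb
        simp [ha, hb]
      · simp [ha]
    · rename_i x heq; injection heq with e1 e2; subst e1; subst e2; rfl
    · rename_i heq; exact absurd heq (by simp)

theorem pvALoop_eq (p : List Char) (i : Nat) (acc : List Char) :
    pvALoop p i acc = acc ++ pvBLoop (p.drop i) := by
  rw [pvALoop]
  by_cases h : i < p.length
  · rw [if_pos h]
    have hdrop : p.drop i = p[i] :: p.drop (i + 1) := List.drop_eq_getElem_cons h
    have e0 : p.getD i ' ' = p[i] := List.getD_eq_getElem p ' ' h
    by_cases hc : (p.getD i ' ' == '%' && decide (i + 2 < p.length)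
        && pvIsHex (p.getD (i+1) ' ') && pvIsHex (p.getD (i+2) ' ')) = true
    · simp only [hc, if_true]
      have hlen : i + 2 < p.length := by
        simp only [Bool.and_eq_true, decide_eq_true_eq] at hc; exact hc.1.1.2
      have h1 : i + 1 < p.length := by omega
      have e1 : p.getD (i+1) ' ' = p[i+1] := List.getD_eq_getElem p ' ' h1
      have e2 : p.getD (i+2) ' ' = p[i+2] := List.getD_eq_getElem p ' ' hlen
      have hP : p[i] = '%' := by
        simp only [Bool.and_eq_true, beq_iff_eq] at hc; rw [← e0]; exact hc.1.1.1
      have hx1 : pvIsHex p[i+1] = true := by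
        simp only [Bool.and_eq_true] at hc; rw [← e1]; exact hc.1.2
      have hx2 : pvIsHex p[i+2] = true := by
        simp only [Bool.and_eq_true] at hc; rw [← e2]; exact hc.2
      have hdrop1 : p.drop (i + 1) = p[i+1] :: p.drop (i + 2) := List.drop_eq_getElem_cons h1
      have hdrop2 : p.drop (i + 2) = p[i+2] :: p.drop (i + 3) := List.drop_eq_getElem_cons hlen
      rw [pvALoop_eq p (i + 3), hdrop, hdrop1, hdrop2, hP, e1, e2]
      simp only [pvBLoop, hx1, hx2, Bool.and_self, if_true]
      simp
    · simp only [hc, Bool.false_eq_true, if_false]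
      rw [pvALoop_eq p (i + 1), hdrop, pvBLoop_cons, e0]
      · simp
      · rintro ⟨hP, h1c, h2c, r, hd, a, b⟩
        apply hc
        have hlen : i + 2 < p.length := by
          have := congrArg List.length hd
          simp [List.length_drop] at this; omega
        have h1 : i + 1 < p.length := by omega
        have hdrop1 : p.drop (i + 1) = p[i+1] :: p.drop (i + 2) := List.drop_eq_getElem_cons h1
        have hdrop2 : p.drop (i + 2) = p[i+2] :: p.drop (i + 3) := List.drop_eq_getElem_cons hlen
        rw [hdrop1, hdrop2] at hd
        simp only [List.cons.injEq] at hd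
        obtain ⟨ea, eb, -⟩ := hd
        have e1 : p.getD (i+1) ' ' = p[i+1] := List.getD_eq_getElem p ' ' h1
        have e2 : p.getD (i+2) ' ' = p[i+2] := List.getD_eq_getElem p ' ' hlen
        simp only [Bool.and_eq_true, beq_iff_eq, decide_eq_true_eq]
        exact ⟨⟨⟨e0.trans hP, hlen⟩, by rw [e1, ea]; exact a⟩, by rw [e2, eb]; exact b⟩
  · rw [if_neg h, List.drop_eq_nil_of_le (le_of_not_gt h)]
    simp [pvBLoop]
termination_by p.length - i
decreasing_by all_goals omega

-- ===== VERDICT (by name: the statement is the Claim_ definition above) =====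
theorem charunicodeencode_spec : Claim_equal_charunicodeencode := by
  intro payload _ _
  unfold Spec_charunicodeencode charunicodeencode charunicodeencode_alt
  by_cases h : payload == ""
  · simp [h]
  · simp only [h, Bool.false_eq_true, if_false]
    rw [pvALoop_eq]
    simp

@[simp] theorem charunicodeencode_raises : Claim_raises_charunicodeencode := by
  unfold Claim_raises_charunicodeencode
  refine ⟨?_, by decide⟩
  intro p _ hr hp
  unfold Raises_charunicodeencode at hr
  unfold Pre_charunicodeencode at hp
  rw [hr] at hp
  exact absurd hp (by simp)
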